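-- pv_equiv track=rewrite | github.com/zoLovro/Castlevania-or-something | levelmechanics.py | generate_stair_pattern
-- ===== SOURCE A (Python) =====
-- def generate_stair_pattern(start_x, start_y, hx, hy, count):
--     coordinates = []
--     coordinates.append((start_x,start_y))
--     count += (count//3) + 1
--     deljeno = 0
--     for x in range(1,count):
--         if x % 3 == 2:
--             coordinates.append((coordinates[x - 1][0], coordinates[x - 1][1] - hy))
--             deljeno += 2
--         else:
--             xcord = start_x + hx * (x - deljeno)
--             coordinates.append((xcord, coordinates[x - 1][1]))
--     return coordinates
-- ===== SOURCE B (Python) =====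
-- def generate_stair_pattern(start_x, start_y, hx, hy, count):
--     steps = count + count // 3
--     return [(start_x, start_y)] + [
--         (start_x + hx * ((x + 2) // 3), start_y - hy * ((x + 1) // 3))
--         for x in range(1, steps + 1)
--     ]
-- ===== Notes on version B (the rewrite author's own statement) =====
-- stated objective: simpler
-- what changed: Replaces the stateful loop (deljeno accumulator, mod-3 branch, back-references to coordinates[x-1]) with a single comprehension computing each coordinate in closed form from its index.
import Mathlib
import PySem

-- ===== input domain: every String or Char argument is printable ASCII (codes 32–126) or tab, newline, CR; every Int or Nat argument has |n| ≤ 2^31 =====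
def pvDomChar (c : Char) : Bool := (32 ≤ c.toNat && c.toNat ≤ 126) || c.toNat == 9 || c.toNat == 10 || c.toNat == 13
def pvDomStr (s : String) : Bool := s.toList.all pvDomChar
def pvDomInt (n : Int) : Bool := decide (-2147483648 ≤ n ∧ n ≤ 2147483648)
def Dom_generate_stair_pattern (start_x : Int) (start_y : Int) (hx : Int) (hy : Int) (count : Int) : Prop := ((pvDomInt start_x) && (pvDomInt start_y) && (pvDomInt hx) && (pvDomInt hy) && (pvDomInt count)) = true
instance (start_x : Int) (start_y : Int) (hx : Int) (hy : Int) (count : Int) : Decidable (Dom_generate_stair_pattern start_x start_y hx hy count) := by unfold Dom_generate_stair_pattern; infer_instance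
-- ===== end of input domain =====

-- ===== PORT A =====
-- B computes each coordinate in closed form from its index instead of A's stateful loop; same return value on all inputs.
def generate_stair_pattern (start_x : Int) (start_y : Int) (hx : Int) (hy : Int) (count : Int) : List (Int × Int) :=
  let coordinates : List (Int × Int) := [] ++ [(start_x, start_y)]
  let count := count + PySem.Int.floordiv count 3 + 1
  let st := (PySem.List.pyRange 1 count 1).foldl (fun (st : List (Int × Int) × Int) x =>
      if PySem.Int.mod x 3 = 2 then
        (st.1 ++ [((PySem.List.pyGetD st.1 (x - 1) (0, 0)).1,
                   (PySem.List.pyGetD st.1 (x - 1) (0, 0)).2 - hy)], st.2 + 2)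
      else
        let xcord := start_x + hx * (x - st.2)
        (st.1 ++ [(xcord, (PySem.List.pyGetD st.1 (x - 1) (0, 0)).2)], st.2))
    (coordinates, 0)
  st.1

-- ===== PORT B =====
def generate_stair_pattern_alt (start_x : Int) (start_y : Int) (hx : Int) (hy : Int) (count : Int) : List (Int × Int) :=
  let steps := count + PySem.Int.floordiv count 3
  [(start_x, start_y)] ++ (PySem.List.pyRange 1 (steps + 1) 1).map (fun x =>
    (start_x + hx * PySem.Int.floordiv (x + 2) 3,
     start_y - hy * PySem.Int.floordiv (x + 1) 3))

-- ===== PRECONDITION & SPEC =====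
def Spec_generate_stair_pattern (start_x : Int) (start_y : Int) (hx : Int) (hy : Int) (count : Int) (out : List (Int × Int)) : Prop := out = generate_stair_pattern_alt start_x start_y hx hy count
instance (start_x : Int) (start_y : Int) (hx : Int) (hy : Int) (count : Int) (out : List (Int × Int)) : Decidable (Spec_generate_stair_pattern start_x start_y hx hy count out) := by unfold Spec_generate_stair_pattern; infer_instance

-- ===== CLAIM (what is proved, stated in full; the proofs are below) =====
def Claim_equal_generate_stair_pattern : Prop := ∀ (start_x : Int) (start_y : Int) (hx : Int) (hy : Int) (count : Int), Dom_generate_stair_pattern start_x start_y hx hy count → Spec_generate_stair_pattern start_x start_y hx hy count (generate_stair_pattern start_x start_y hx hy count)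

-- ===== LEMMAS AND PROOFS =====

def stairG (start_x start_y hx hy : Int) (x : Int) : Int × Int :=
  (start_x + hx * PySem.Int.floordiv (x + 2) 3,
   start_y - hy * PySem.Int.floordiv (x + 1) 3)

lemma stair_loop_inv (start_x start_y hx hy : Int) (n : Nat) :
    (PySem.List.pyRange 1 (1 + (n : Int)) 1).foldl (fun (st : List (Int × Int) × Int) x =>
      if PySem.Int.mod x 3 = 2 then
        (st.1 ++ [((PySem.List.pyGetD st.1 (x - 1) (0, 0)).1,
                   (PySem.List.pyGetD st.1 (x - 1) (0, 0)).2 - hy)], st.2 + 2)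
      else
        let xcord := start_x + hx * (x - st.2)
        (st.1 ++ [(xcord, (PySem.List.pyGetD st.1 (x - 1) (0, 0)).2)], st.2))
      ([(start_x, start_y)], 0)
    = ((PySem.List.pyRange 0 (1 + (n : Int)) 1).map (stairG start_x start_y hx hy),
       2 * PySem.Int.floordiv (1 + (n : Int)) 3) := by
  induction n with
  | zero =>
      have h1 : PySem.List.pyRange 1 (1 + ((0:Nat) : Int)) 1 = [] :=
        PySem.List.pyRange_one_eq_nil (by omega)
      have h2 : PySem.List.pyRange 0 (1 + ((0:Nat) : Int)) 1 = [0] := by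
        simpa using PySem.List.pyRange_one_singleton (a := (0:Int))
      rw [h1, h2]
      simp [stairG]
  | succ n ih =>
      have hcast : (1 + ((n+1:Nat) : Int)) = (1 + (n : Int)) + 1 := by push_cast; ring
      rw [hcast, PySem.List.pyRange_one_succ_right (by omega),
          PySem.List.pyRange_one_succ_right (a := (0:Int)) (by omega),
          List.foldl_append, ih]
      have hget : PySem.List.pyGetD
          ((PySem.List.pyRange 0 (1 + (n : Int)) 1).map (stairG start_x start_y hx hy))
          ((1 + (n : Int)) - 1) (0, 0) = stairG start_x start_y hx hy (n : Int) := by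
        rw [show (1 + (n : Int)) - 1 = (n : Int) by ring]
        exact PySem.List.pyGetD_map_pyRange_of_nonneg _ _ _ _ (by omega) (by omega)
      simp only [List.foldl, List.map_append, List.map_cons, List.map_nil, hget]
      have fdc : ∀ k : Nat, PySem.Int.floordiv (k : Int) 3 = ((k / 3 : Nat) : Int) :=
        fun k => by exact_mod_cast PySem.Int.floordiv_natCast k 3
      have mdc : ∀ k : Nat, PySem.Int.mod (k : Int) 3 = ((k % 3 : Nat) : Int) :=
        fun k => by exact_mod_cast PySem.Int.mod_natCast k 3
      have c1 : (1 + (n : Int)) = ((n + 1 : Nat) : Int) := by push_cast; ring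
      have c2 : (1 + (n : Int) + 1) = ((n + 2 : Nat) : Int) := by push_cast; ring
      by_cases hm : PySem.Int.mod (1 + (n : Int)) 3 = 2
      · rw [if_pos hm]
        have hm' : (n + 1) % 3 = 2 := by rw [c1, mdc] at hm; omega
        have eg : ((stairG start_x start_y hx hy (n : Int)).1,
                   (stairG start_x start_y hx hy (n : Int)).2 - hy)
                 = stairG start_x start_y hx hy (1 + (n : Int)) := by
          unfold stairG
          rw [show (1 + (n : Int) + 2) = ((n + 3 : Nat) : Int) by push_cast; ring,
              show (1 + (n : Int) + 1) = ((n + 2 : Nat) : Int) by push_cast; ring,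
              show ((n : Int) + 2) = ((n + 2 : Nat) : Int) by push_cast; ring,
              show ((n : Int) + 1) = ((n + 1 : Nat) : Int) by push_cast; ring,
              fdc, fdc, fdc]
          simp only [Prod.mk.injEq]
          refine ⟨by rw [show (n + 3) / 3 = (n + 2) / 3 by omega], ?_⟩
          rw [show (n + 2) / 3 = (n + 1) / 3 + 1 by omega]
          push_cast; ring
        have ed : 2 * PySem.Int.floordiv (1 + (n : Int)) 3 + 2
                 = 2 * PySem.Int.floordiv (1 + (n : Int) + 1) 3 := by
          rw [c2, c1, fdc, fdc, show (n + 2) / 3 = (n + 1) / 3 + 1 by omega]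
          push_cast; ring
        rw [eg, ed]
      · rw [if_neg hm]
        have hm' : (n + 1) % 3 ≠ 2 := by rw [c1, mdc] at hm; omega
        have eg : (start_x + hx * ((1 + (n : Int)) - 2 * PySem.Int.floordiv (1 + (n : Int)) 3),
                   (stairG start_x start_y hx hy (n : Int)).2)
                 = stairG start_x start_y hx hy (1 + (n : Int)) := by
          unfold stairG
          rw [show (1 + (n : Int) + 2) = ((n + 3 : Nat) : Int) by push_cast; ring,
              show (1 + (n : Int) + 1) = ((n + 2 : Nat) : Int) by push_cast; ring,
              show ((n : Int) + 1) = ((n + 1 : Nat) : Int) by push_cast; ring,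
              c1, fdc, fdc, fdc,
              show (n + 2) / 3 = (n + 1) / 3 by omega]
          simp only [Prod.mk.injEq, and_true]
          congr 1
          congr 1
          omega
        have ed : 2 * PySem.Int.floordiv (1 + (n : Int)) 3
                 = 2 * PySem.Int.floordiv (1 + (n : Int) + 1) 3 := by
          rw [c2, c1, fdc, fdc, show (n + 2) / 3 = (n + 1) / 3 by omega]
        rw [ed] at eg ⊢
        rw [eg]

-- ===== VERDICT (by name: the statement is the Claim_ definition above) =====
theorem generate_stair_pattern_spec : Claim_equal_generate_stair_pattern := by
  intro start_x start_y hx hy count _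
  unfold Spec_generate_stair_pattern generate_stair_pattern generate_stair_pattern_alt
  simp only [List.nil_append]
  by_cases h : count + PySem.Int.floordiv count 3 + 1 ≤ 1
  · rw [PySem.List.pyRange_one_eq_nil h]
    simp
  · have hm : count + PySem.Int.floordiv count 3 + 1
        = 1 + (((count + PySem.Int.floordiv count 3 + 1 - 1).toNat : Nat) : Int) := by omega
    rw [hm, stair_loop_inv]
    have hcons : PySem.List.pyRange 0 (1 + (((count + PySem.Int.floordiv count 3 + 1 - 1).toNat : Nat) : Int)) 1
        = 0 :: PySem.List.pyRange 1 (1 + (((count + PySem.Int.floordiv count 3 + 1 - 1).toNat : Nat) : Int)) 1 :=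
      PySem.List.pyRange_one_cons (by omega)
    rw [hcons]
    simp only [List.map_cons]
    rw [show stairG start_x start_y hx hy 0 = (start_x, start_y) by simp [stairG]]
    rfl
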